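-- pv_equiv track=rewrite | github.com/bskrzypczak/Projects | PUT/Kryptografia/lab2_dh.py | check_g
-- ===== SOURCE A (Python) =====
-- def check_g(g, n):
--     lista = []
--     for i in range(n - 1):
--         x = pow(g, i, n)
--         if x not in lista:
--             lista.append(x)
--         else:
--             return False
--     return True
-- ===== SOURCE B (Python) =====
-- def check_g(g, n):
--     ps = sorted(pow(g, i, n) for i in range(n - 1))
--     return all(a != b for a, b in zip(ps, ps[1:]))
-- ===== Notes on version B (the rewrite author's own statement) =====
-- stated objective: alternative
-- what changed: B sorts the list of computed powers and checks that no two adjacent elements of the sorted list are equal (sort-then-adjacent-scan), replacing A's incremental build of a seen-list with a per-iteration membership scan and early False return.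
import Mathlib
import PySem

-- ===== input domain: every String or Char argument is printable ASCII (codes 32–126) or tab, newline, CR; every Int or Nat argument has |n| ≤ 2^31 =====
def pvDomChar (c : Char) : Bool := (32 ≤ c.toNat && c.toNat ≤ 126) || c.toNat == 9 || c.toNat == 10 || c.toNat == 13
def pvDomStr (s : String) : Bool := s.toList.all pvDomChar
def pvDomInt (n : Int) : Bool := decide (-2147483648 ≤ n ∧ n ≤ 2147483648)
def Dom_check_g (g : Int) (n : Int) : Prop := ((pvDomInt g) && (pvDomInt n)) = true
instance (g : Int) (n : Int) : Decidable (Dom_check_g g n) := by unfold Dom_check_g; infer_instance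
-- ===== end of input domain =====

-- B sorts the computed powers and checks adjacent pairs for equality, replacing A's seen-list membership loop with early return; objective: alternative (sort-then-scan).


-- ===== PORT A =====
-- pow(g, i, n): Python's three-argument pow (modular exponentiation); exact for i ≥ 0, n ≠ 0
-- (here it is only ever called with n ≥ 2, i ≥ 0)
def pyPowMod (g : Int) (n : Int) : Nat → Int
  | 0 => PySem.Int.mod 1 n
  | i + 1 => PySem.Int.mod (pyPowMod g n i * g) n

-- the 'for i in range(n-1)' loop with the seen-list 'lista' and early 'return False'
def check_g_go (g : Int) (n : Int) : List Int → List Int → Bool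
  | [], _ => true
  | i :: rest, lista =>
    let x := pyPowMod g n i.toNat
    if x ∈ lista then false else check_g_go g n rest (lista ++ [x])

def check_g (g : Int) (n : Int) : Bool :=
  check_g_go g n (PySem.List.pyRange 0 (n - 1) 1) []

-- ===== PORT B =====
-- ps = sorted(pow(g, i, n) for i in range(n - 1)); all(a != b for a, b in zip(ps, ps[1:]))
-- ps[1:] on a list is exactly List.drop 1 (start index 1 ≥ 0, no stop)
def check_g_alt (g : Int) (n : Int) : Bool :=
  let ps := PySem.List.sorted ((PySem.List.pyRange 0 (n - 1) 1).map
              (fun i => pyPowMod g n i.toNat)) (fun x => x) false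
  (ps.zip (ps.drop 1)).all (fun p => p.1 != p.2)

-- ===== PRECONDITION & SPEC =====
def Spec_check_g (g : Int) (n : Int) (out : Bool) : Prop := out = check_g_alt g n
instance (g : Int) (n : Int) (out : Bool) : Decidable (Spec_check_g g n out) := by unfold Spec_check_g; infer_instance

-- ===== CLAIM (what is proved, stated in full; the proofs are below) =====
def Claim_equal_check_g : Prop := ∀ (g : Int) (n : Int), Dom_check_g g n → Spec_check_g g n (check_g g n)

-- ===== LEMMAS AND PROOFS =====

-- A's loop returns true iff the remaining powers are pairwise distinct and avoid the accumulator
theorem go_eq (g n : Int) (idxs lista : List Int) :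
    check_g_go g n idxs lista = true ↔
      ((idxs.map (fun i => pyPowMod g n i.toNat)).Nodup ∧
       ∀ x ∈ idxs.map (fun i => pyPowMod g n i.toNat), x ∉ lista) := by
  induction idxs generalizing lista with
  | nil => simp [check_g_go]
  | cons i rest ih =>
    simp only [check_g_go, List.map_cons]
    split_ifs with h
    · simp only [false_iff, not_and]
      intro _ hall
      exact hall _ (List.mem_cons_self ..) h
    · rw [ih]
      simp only [List.nodup_cons, List.mem_cons, List.mem_append, List.not_mem_nil, or_false]
      constructor
      · rintro ⟨hn, hall⟩
        refine ⟨⟨fun hm => hall _ hm (Or.inr rfl), hn⟩, ?_⟩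
        rintro x (rfl | hx)
        · exact h
        · exact fun hl => hall x hx (Or.inl hl)
      · rintro ⟨⟨hni, hn⟩, hall⟩
        refine ⟨hn, fun x hx => ?_⟩
        rintro (hl | rfl)
        · exact hall x (Or.inr hx) hl
        · exact hni hx

-- the zip-with-tail adjacency check decides IsChain (· ≠ ·)
theorem zip_tail_all_ne (l : List Int) :
    ((l.zip (l.drop 1)).all fun p => p.1 != p.2) = true ↔ l.IsChain (· ≠ ·) := by
  induction l with
  | nil => simp
  | cons a t ih =>
    cases t with
    | nil => simp
    | cons b t' =>
      simp only [List.drop_succ_cons, List.drop_zero, List.zip_cons_cons, List.all_cons,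
        Bool.and_eq_true, bne_iff_ne, ne_eq, List.isChain_cons_cons] at *
      tauto

-- on a ≤-sorted list, adjacent distinctness is the same as Nodup
theorem chain_ne_iff_nodup : ∀ (l : List Int), l.Pairwise (· ≤ ·) →
    (l.IsChain (· ≠ ·) ↔ l.Nodup)
  | [], _ => by simp
  | [_], _ => by simp
  | a :: b :: t, hp => by
    have hp' : (b :: t).Pairwise (· ≤ ·) := hp.tail
    have hab : a ≤ b := (List.pairwise_cons.mp hp).1 b (List.mem_cons_self ..)
    have hbt : ∀ x ∈ t, b ≤ x := (List.pairwise_cons.mp hp').1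
    rw [List.isChain_cons_cons, List.nodup_cons, chain_ne_iff_nodup (b :: t) hp']
    constructor
    · rintro ⟨hne, hnd⟩
      refine ⟨?_, hnd⟩
      simp only [List.mem_cons, not_or]
      refine ⟨hne, fun hx => ?_⟩
      have : a < b := lt_of_le_of_ne hab hne
      have := hbt a hx
      omega
    · rintro ⟨hnm, hnd⟩
      exact ⟨fun hx => hnm (hx ▸ List.mem_cons_self ..), hnd⟩

-- ===== VERDICT (by name: the statement is the Claim_ definition above) =====
theorem check_g_spec : Claim_equal_check_g := by
  intro g n _
  unfold Spec_check_g check_g check_g_alt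
  apply Bool.eq_iff_iff.mpr
  rw [go_eq, zip_tail_all_ne,
    chain_ne_iff_nodup _ (PySem.List.sorted_pairwise
      ((PySem.List.pyRange 0 (n - 1) 1).map (fun i => pyPowMod g n i.toNat)) (fun x => x)),
    List.Perm.nodup_iff (PySem.List.sorted_perm
      ((PySem.List.pyRange 0 (n - 1) 1).map (fun i => pyPowMod g n i.toNat)) (fun x => x) false)]
  simp
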